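-- pv_equiv track=rewrite | github.com/pranavgandhi01/code_challenge2023 | MaximumScore/max_score_balance_stock.py | getMaximumScore
-- ===== SOURCE A (Python) =====
-- def getMaximumScore(stockPrices):
--     n = len(stockPrices)
--     dp = [0] * n  # dp[i] stores the maximum score for a balanced subsequence ending at index i
--
--     for i in range(1, n):
--         dp[i] = stockPrices[i]  # Initialize with the price at index i
--         for j in range(i - 1, -1, -1):
--             diff_days = i - j
--             price_diff = stockPrices[i] - stockPrices[j]
--
--             if price_diff == diff_days:
--                 dp[i] = max(dp[i], dp[j] + stockPrices[i])
--
--         dp[i] = max(dp[i], dp[i - 1])  # Consider not selecting the current day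
--
--     return max(dp)
-- ===== SOURCE B (Python) =====
-- def getMaximumScore(stockPrices):
--     if not stockPrices:
--         return 0
--     best = {stockPrices[0]: 0}  # key p-i -> max dp over indices seen with that key
--     prev = 0
--     for i in range(1, len(stockPrices)):
--         p = stockPrices[i]
--         k = p - i
--         cur = max(p, prev)
--         if k in best:
--             cur = max(cur, best[k] + p)
--         best[k] = max(best.get(k, cur), cur)
--         prev = cur
--     return prev
-- ===== Notes on version B (the rewrite author's own statement) =====
-- stated objective: faster
-- what changed: A's quadratic inner scan over all earlier days is replaced by a single pass that keeps, in a dictionary keyed by price-minus-index, the best chain value for each key, plus the running prefix maximum.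
import Mathlib
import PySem

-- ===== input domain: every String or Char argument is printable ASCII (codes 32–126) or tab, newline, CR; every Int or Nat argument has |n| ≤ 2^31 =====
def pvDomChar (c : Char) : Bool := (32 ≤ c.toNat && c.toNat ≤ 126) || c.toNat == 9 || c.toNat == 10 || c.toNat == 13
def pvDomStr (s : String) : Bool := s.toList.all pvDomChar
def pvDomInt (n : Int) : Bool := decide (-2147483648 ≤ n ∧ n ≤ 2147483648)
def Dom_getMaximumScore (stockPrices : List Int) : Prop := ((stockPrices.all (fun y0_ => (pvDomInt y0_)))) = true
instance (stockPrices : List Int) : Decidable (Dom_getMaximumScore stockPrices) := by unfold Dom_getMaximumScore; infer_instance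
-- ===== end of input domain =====

-- B replaces A's quadratic inner scan by a one-pass DP with a dictionary keyed by price minus index.

-- ===== PORT A =====
def getMaximumScore (stockPrices : List Int) : Int :=
  let n : Int := stockPrices.length
  let dp0 : List Int := List.replicate stockPrices.length 0
  let dp := (PySem.List.pyRange 1 n 1).foldl (fun dp i =>
    let dp := PySem.List.pySetD dp i (PySem.List.pyGetD stockPrices i 0)
    let dp := (PySem.List.pyRange (i - 1) (-1) (-1)).foldl (fun dp j =>
      let diff_days := i - j
      let price_diff := PySem.List.pyGetD stockPrices i 0 - PySem.List.pyGetD stockPrices j 0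
      if price_diff == diff_days then
        PySem.List.pySetD dp i (max (PySem.List.pyGetD dp i 0)
          (PySem.List.pyGetD dp j 0 + PySem.List.pyGetD stockPrices i 0))
      else dp) dp
    PySem.List.pySetD dp i (max (PySem.List.pyGetD dp i 0) (PySem.List.pyGetD dp (i - 1) 0))) dp0
  -- max(dp) raises on the empty list: excluded by Pre_
  (PySem.List.max? dp (fun x => x)).getD 0

-- ===== PORT B =====
def getMaximumScore_alt (stockPrices : List Int) : Int :=
  if stockPrices = [] then 0
  else
    let n : Int := stockPrices.length
    let st := (PySem.List.pyRange 1 n 1).foldl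
      (fun (st : PySem.Dict Int Int × Int) i =>
        let best := st.1
        let prev := st.2
        let p := PySem.List.pyGetD stockPrices i 0
        let k := p - i
        let cur := max p prev
        let cur := match PySem.Dict.get? best k with
          | some v => max cur (v + p)
          | none => cur
        (PySem.Dict.insert best k (max (PySem.Dict.getD best k cur) cur), cur))
      (PySem.Dict.insert PySem.Dict.empty (PySem.List.pyGetD stockPrices 0 0) 0, 0)
    st.2

-- ===== PRECONDITION & SPEC =====
-- Pre_ excludes only the empty list, on which Python A raises ValueError (max() of an empty sequence).
def Pre_getMaximumScore (stockPrices : List Int) : Prop := stockPrices ≠ []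
instance (stockPrices : List Int) : Decidable (Pre_getMaximumScore stockPrices) := by
  unfold Pre_getMaximumScore; infer_instance

def pvWitness_getMaximumScore : List Int := [1, 2, 5]

def Spec_getMaximumScore (stockPrices : List Int) (out : Int) : Prop := out = getMaximumScore_alt stockPrices
instance (stockPrices : List Int) (out : Int) : Decidable (Spec_getMaximumScore stockPrices out) := by
  unfold Spec_getMaximumScore; infer_instance

-- ===== CLAIM (what is proved, stated in full; the proofs are below) =====
def Claim_equal_getMaximumScore : Prop := ∀ (stockPrices : List Int), Dom_getMaximumScore stockPrices → Pre_getMaximumScore stockPrices → Spec_getMaximumScore stockPrices (getMaximumScore stockPrices)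

-- ===== LEMMAS AND PROOFS =====

-- key of day j : price[j] - j; two days i > j can be chained exactly when their keys agree
def pvKey (p : List Int) (j : Nat) : Int := p.getD j 0 - (j : Int)

-- the value A's inner loop accumulates into dp[i] (i = acc.length), as an ascending filter/map
def pvInner (p : List Int) (acc : List Int) : Int :=
  (((List.range acc.length).filter (fun j => pvKey p j == pvKey p acc.length)).map
      (fun j => acc.getD j 0 + p.getD acc.length 0)).foldl max (p.getD acc.length 0)

-- dp[0..m] as A finalises it, prefix by prefix
def pvDvals (p : List Int) : Nat → List Int
  | 0 => [0]
  | m + 1 => pvDvals p m ++ [max (pvInner p (pvDvals p m)) ((pvDvals p m).getD m 0)]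

def pvD (p : List Int) (m : Nat) : Int := (pvDvals p m).getD m 0

-- the value B's dictionary holds at key k after day m
def pvKeyMax (p : List Int) (m : Nat) (k : Int) : Option Int :=
  match ((List.range (m + 1)).filter (fun j => pvKey p j == k)).map (pvD p) with
  | [] => none
  | x :: t => some (t.foldl max x)

-- A's outer-loop body, decomposed for the proof (definitionally equal to the port's lambda)
def pvInnerA (p : List Int) (i : Int) (dp : List Int) : List Int :=
  (PySem.List.pyRange (i - 1) (-1) (-1)).foldl (fun dp j =>
    if PySem.List.pyGetD p i 0 - PySem.List.pyGetD p j 0 == i - j then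
      PySem.List.pySetD dp i (max (PySem.List.pyGetD dp i 0)
        (PySem.List.pyGetD dp j 0 + PySem.List.pyGetD p i 0))
    else dp) dp

def pvBodyA (p : List Int) (dp : List Int) (i : Int) : List Int :=
  let dp1 := PySem.List.pySetD dp i (PySem.List.pyGetD p i 0)
  let dp2 := pvInnerA p i dp1
  PySem.List.pySetD dp2 i (max (PySem.List.pyGetD dp2 i 0) (PySem.List.pyGetD dp2 (i - 1) 0))

-- B's loop body, decomposed for the proof (definitionally equal to the port's lambda)
def pvCur (p : List Int) (st : PySem.Dict Int Int × Int) (i : Int) : Int :=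
  match PySem.Dict.get? st.1 (PySem.List.pyGetD p i 0 - i) with
  | some v => max (max (PySem.List.pyGetD p i 0) st.2) (v + PySem.List.pyGetD p i 0)
  | none => max (PySem.List.pyGetD p i 0) st.2

def pvBodyB (p : List Int) (st : PySem.Dict Int Int × Int) (i : Int) : PySem.Dict Int Int × Int :=
  (PySem.Dict.insert st.1 (PySem.List.pyGetD p i 0 - i)
      (max (PySem.Dict.getD st.1 (PySem.List.pyGetD p i 0 - i) (pvCur p st i)) (pvCur p st i)),
   pvCur p st i)

theorem pvA_eq (p : List Int) : getMaximumScore p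
    = (PySem.List.max? ((PySem.List.pyRange 1 (p.length : Int) 1).foldl (pvBodyA p)
        (List.replicate p.length 0)) (fun x => x)).getD 0 := rfl

theorem pvB_eq (p : List Int) (hp : ¬ (p = [])) : getMaximumScore_alt p
    = ((PySem.List.pyRange 1 (p.length : Int) 1).foldl (pvBodyB p)
        (PySem.Dict.insert PySem.Dict.empty (PySem.List.pyGetD p 0 0) 0, 0)).2 := by
  unfold getMaximumScore_alt
  rw [if_neg hp]
  rfl

theorem pvDvals_length (p : List Int) (m : Nat) : (pvDvals p m).length = m + 1 := by
  induction m with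
  | zero => rfl
  | succ m ih => simp [pvDvals, ih]

theorem pvDvals_getD (p : List Int) {j m : Nat} (h : j ≤ m) :
    (pvDvals p m).getD j 0 = pvD p j := by
  induction m with
  | zero => interval_cases j; rfl
  | succ m ih =>
    rcases Nat.lt_or_ge j (m + 1) with hj | hj
    · rw [pvDvals, List.getD_append _ _ _ _ (by rw [pvDvals_length]; omega)]
      exact ih (by omega)
    · have hjm : j = m + 1 := by omega
      subst hjm; rfl

theorem pvD_succ (p : List Int) (m : Nat) :
    pvD p (m + 1) = max (pvInner p (pvDvals p m)) ((pvDvals p m).getD m 0) := by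
  show (pvDvals p (m + 1)).getD (m + 1) 0 = _
  rw [pvDvals, List.getD_append_right _ _ _ _ (by rw [pvDvals_length])]
  rw [pvDvals_length]
  simp

theorem pvD_mono (p : List Int) (m : Nat) : ∀ y ∈ pvDvals p m, y ≤ pvD p m := by
  induction m with
  | zero => intro y hy; simp only [pvDvals, List.mem_singleton] at hy; subst hy; rfl
  | succ m ih =>
    intro y hy
    rw [pvD_succ]
    rw [pvDvals, List.mem_append, List.mem_singleton] at hy
    rcases hy with hy | hy
    · have h1 : y ≤ pvD p m := ih y hy
      have h2 : pvD p m ≤ (pvDvals p m).getD m 0 := le_of_eq rfl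
      exact le_trans h1 (le_trans h2 (le_max_right _ _))
    · subst hy; exact le_refl _

theorem pv_foldl_if_max (P : Nat → Bool) (f : Nat → Int) :
    ∀ (js : List Nat) (a : Int),
      js.foldl (fun c j => if P j then max c (f j) else c) a
        = ((js.filter P).map f).foldl max a := by
  intro js
  induction js with
  | nil => intro a; rfl
  | cons j js ih =>
    intro a
    by_cases hP : P j
    · simp only [List.foldl_cons, List.filter_cons, hP, if_pos, List.map_cons]
      exact ih (max a (f j))
    · simp only [List.foldl_cons, List.filter_cons, hP]
      simp only [Bool.false_eq_true, if_false]
      exact ih a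

theorem pv_foldl_max_max (t : List Int) : ∀ a x : Int, t.foldl max (max a x) = max a (t.foldl max x) := by
  induction t with
  | nil => intro a x; rfl
  | cons c t ih =>
    intro a x
    simp only [List.foldl_cons]
    rw [max_assoc, ih]

theorem pv_foldl_max_map_add (q : Int) (t : List Int) :
    ∀ x : Int, (t.map (· + q)).foldl max (x + q) = t.foldl max x + q := by
  induction t with
  | nil => intro x; rfl
  | cons c t ih =>
    intro x
    simp only [List.map_cons, List.foldl_cons]
    rw [show max (x + q) (c + q) = max x c + q by omega, ih]

theorem pv_inner_scalar (P : Nat → Bool) (q : Int) (i : Nat) :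
    ∀ (js : List Nat), (∀ j ∈ js, j < i) → ∀ (dp : List Int), i < dp.length →
      js.foldl (fun d j => if P j then d.set i (max (d.getD i 0) (d.getD j 0 + q)) else d) dp
        = dp.set i (js.foldl (fun c j => if P j then max c (dp.getD j 0 + q) else c) (dp.getD i 0)) := by
  intro js
  induction js with
  | nil =>
    intro _ dp hi
    simp only [List.foldl_nil]
    rw [List.getD_eq_getElem _ _ hi, List.set_getElem_self]
  | cons j js ih =>
    intro hb dp hi
    have hji : j < i := hb j (List.mem_cons_self ..)
    simp only [List.foldl_cons]
    by_cases hP : P j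
    · simp only [hP, if_pos]
      rw [ih (fun j' hj' => hb j' (List.mem_cons_of_mem _ hj')) _ (by simpa using hi)]
      rw [List.set_set]
      have hgets : ∀ j' : Nat, j' ≠ i →
          (dp.set i (max (dp.getD i 0) (dp.getD j 0 + q))).getD j' 0 = dp.getD j' 0 := by
        intro j' hj'
        rcases Nat.lt_or_ge j' dp.length with hlt | hge
        · rw [List.getD_eq_getElem _ _ (by simpa using hlt), List.getD_eq_getElem _ _ hlt]
          simp only [List.getElem_set]
          rw [if_neg (by omega)]
        · rw [List.getD_eq_default _ _ (by simpa using hge), List.getD_eq_default _ _ hge]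
      have hIget : (dp.set i (max (dp.getD i 0) (dp.getD j 0 + q))).getD i 0
          = max (dp.getD i 0) (dp.getD j 0 + q) := by
        rw [List.getD_eq_getElem _ _ (by simpa using hi)]
        simp
      congr 1
      rw [hIget]
      apply PySem.List.foldl_congr_mem
      intro c j' hj'
      have hne : j' ≠ i := by have := hb j' (List.mem_cons_of_mem _ hj'); omega
      by_cases h : P j' <;> simp only [h, hgets j' hne, if_true, Bool.false_eq_true, if_false]
    · simp only [hP]
      simp only [Bool.false_eq_true, if_false]
      exact ih (fun j' hj' => hb j' (List.mem_cons_of_mem _ hj')) dp hi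


theorem pvPred_congr (p : List Int) (m : Nat) :
    ((List.range (m + 1)).filter
        (fun j => p.getD (m + 1) 0 - p.getD j 0 == ((m + 1 : Nat) : Int) - (j : Int)))
      = ((List.range (m + 1)).filter (fun j => pvKey p j == pvKey p (m + 1))) := by
  apply List.filter_congr
  intro j hj
  rw [Bool.eq_iff_iff]
  simp only [beq_iff_eq, pvKey]
  constructor <;> intro <;> omega

theorem pvInnerA_eq (p : List Int) (m : Nat) (dp : List Int) (hlen : m + 1 < dp.length) :
    pvInnerA p ((m + 1 : Nat) : Int) dp
      = dp.set (m + 1)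
          ((((List.range (m + 1)).filter (fun j => pvKey p j == pvKey p (m + 1))).map
              (fun j => dp.getD j 0 + p.getD (m + 1) 0)).foldl max (dp.getD (m + 1) 0)) := by
  unfold pvInnerA
  rw [show ((m + 1 : Nat) : Int) - 1 = (m : Int) by push_cast; ring]
  rw [PySem.List.pyRange_neg_one_eq_reverse]
  rw [show (-1 : Int) + 1 = 0 by ring, show (m : Int) + 1 = ((m + 1 : Nat) : Int) by push_cast; ring]
  rw [PySem.List.pyRange_zero_nat]
  rw [← List.map_reverse, List.foldl_map]
  simp only [PySem.List.pyGetD_natCast, PySem.List.pySetD_natCast]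
  rw [pv_inner_scalar (fun j => p.getD (m + 1) 0 - p.getD j 0 == ((m + 1 : Nat) : Int) - (j : Int))
    (p.getD (m + 1) 0) (m + 1) ((List.range (m + 1)).reverse)
    (fun j hj => by simp at hj; omega) dp hlen]
  congr 1
  rw [pv_foldl_if_max]
  rw [List.filter_reverse, pvPred_congr]
  exact (((List.reverse_perm _).map _).foldl_eq _)

theorem pvBodyA_step (p : List Int) (m : Nat) (h : m + 1 < p.length) :
    pvBodyA p (pvDvals p m ++ List.replicate (p.length - 1 - m) 0) ((m + 1 : Nat) : Int)
      = pvDvals p (m + 1) ++ List.replicate (p.length - 1 - (m + 1)) 0 := by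
  have hL : (pvDvals p m).length = m + 1 := pvDvals_length p m
  simp only [pvBodyA, PySem.List.pySetD_natCast, PySem.List.pyGetD_natCast]
  rw [show p.length - 1 - m = (p.length - 2 - m) + 1 by omega, List.replicate_succ]
  rw [List.set_append_right _ _ (by omega), hL, Nat.sub_self, List.set_cons_zero]
  rw [pvInnerA_eq p m _ (by simp only [List.length_append, List.length_cons, hL]; omega)]
  have hinit : (pvDvals p m ++ p.getD (m + 1) 0 :: List.replicate (p.length - 2 - m) 0).getD (m + 1) 0
      = p.getD (m + 1) 0 := by
    rw [List.getD_append_right _ _ _ _ (by omega), hL, Nat.sub_self]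
    rfl
  have hread : ∀ j ∈ (List.range (m + 1)).filter (fun j => pvKey p j == pvKey p (m + 1)),
      (fun j => (pvDvals p m ++ p.getD (m + 1) 0 :: List.replicate (p.length - 2 - m) 0).getD j 0
          + p.getD (m + 1) 0) j
        = (fun j => (pvDvals p m).getD j 0 + p.getD (m + 1) 0) j := by
    intro j hj
    have hjm : j < m + 1 := List.mem_range.mp (List.mem_of_mem_filter hj)
    simp only
    rw [List.getD_append _ _ _ _ (by omega)]
  rw [hinit, List.map_congr_left hread]
  have hV : (((List.range (m + 1)).filter (fun j => pvKey p j == pvKey p (m + 1))).map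
        (fun j => (pvDvals p m).getD j 0 + p.getD (m + 1) 0)).foldl max (p.getD (m + 1) 0)
      = pvInner p (pvDvals p m) := by
    simp only [pvInner, hL]
  rw [hV]
  rw [List.set_append_right _ _ (by omega), hL, Nat.sub_self, List.set_cons_zero]
  rw [show ((m + 1 : Nat) : Int) - 1 = ((m : Nat) : Int) by push_cast; ring]
  simp only [PySem.List.pyGetD_natCast]
  rw [List.getD_append_right _ _ _ _ (by omega), hL, Nat.sub_self]
  rw [show (pvInner p (pvDvals p m) :: List.replicate (p.length - 2 - m) 0).getD 0 0
      = pvInner p (pvDvals p m) from rfl]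
  rw [List.getD_append _ _ _ _ (by omega)]
  rw [List.set_append_right _ _ (by omega), hL, Nat.sub_self, List.set_cons_zero]
  rw [show pvDvals p (m + 1)
      = pvDvals p m ++ [max (pvInner p (pvDvals p m)) ((pvDvals p m).getD m 0)] from rfl]
  rw [List.append_assoc]
  rw [show p.length - 1 - (m + 1) = p.length - 2 - m by omega]
  rfl

theorem pvA_loop (p : List Int) : ∀ m : Nat, m < p.length →
    (PySem.List.pyRange 1 ((m : Int) + 1) 1).foldl (pvBodyA p) (List.replicate p.length 0)
      = pvDvals p m ++ List.replicate (p.length - 1 - m) 0 := by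
  intro m
  induction m with
  | zero =>
    intro h
    rw [show ((0 : Nat) : Int) + 1 = 1 by ring, PySem.List.pyRange_one_eq_nil (le_refl _),
        List.foldl_nil]
    show List.replicate p.length 0 = [0] ++ List.replicate (p.length - 1 - 0) 0
    rw [Nat.sub_zero]
    conv_lhs => rw [show p.length = (p.length - 1) + 1 by omega]
    rw [List.replicate_succ]
    rfl
  | succ m ih =>
    intro h
    rw [show ((m + 1 : Nat) : Int) + 1 = ((m : Int) + 1) + 1 by push_cast; ring]
    rw [PySem.List.pyRange_one_succ_right (by omega), List.foldl_append, List.foldl_cons,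
        List.foldl_nil]
    rw [ih (by omega)]
    rw [show ((m : Int) + 1) = ((m + 1 : Nat) : Int) by push_cast; ring]
    exact pvBodyA_step p m h

theorem pvA_final (p : List Int) (hp : p ≠ []) :
    getMaximumScore p = pvD p (p.length - 1) := by
  have hlen : 0 < p.length := List.length_pos_iff.mpr hp
  rw [pvA_eq]
  rw [show (p.length : Int) = ((p.length - 1 : Nat) : Int) + 1 by omega]
  rw [pvA_loop p (p.length - 1) (by omega)]
  rw [show p.length - 1 - (p.length - 1) = 0 by omega, List.replicate_zero, List.append_nil]
  obtain ⟨x, t, hxt⟩ := List.exists_cons_of_ne_nil (l := pvDvals p (p.length - 1)) (by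
    intro hnil
    have := pvDvals_length p (p.length - 1)
    rw [hnil] at this
    simp at this)
  rw [hxt, PySem.List.max?_id_cons]
  simp only [Option.getD_some]
  have hmem : t.foldl max x = x ∨ t.foldl max x ∈ t := PySem.List.foldl_max_mem t x
  have hle : t.foldl max x ≤ pvD p (p.length - 1) := by
    rcases hmem with hc | hc
    · rw [hc]
      exact pvD_mono p _ x (by rw [hxt]; exact List.mem_cons_self ..)
    · exact pvD_mono p _ _ (by rw [hxt]; exact List.mem_cons_of_mem _ hc)
  have hge : pvD p (p.length - 1) ≤ t.foldl max x := by
    have hmemD : pvD p (p.length - 1) ∈ pvDvals p (p.length - 1) := by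
      rw [pvD, List.getD_eq_getElem _ _ (by rw [pvDvals_length]; omega)]
      exact List.getElem_mem _
    rw [hxt] at hmemD
    rcases List.mem_cons.mp hmemD with hc | hc
    · rw [hc]
      exact (PySem.List.le_foldl_max t x).1
    · exact (PySem.List.le_foldl_max t x).2 _ hc
  omega

theorem pvKeyMax_zero (p : List Int) (k : Int) :
    ((PySem.Dict.insert PySem.Dict.empty (p.getD 0 0) 0 : PySem.Dict Int Int)).get? k
      = pvKeyMax p 0 k := by
  rw [PySem.Dict.get?_insert]
  unfold pvKeyMax
  simp only [List.range_succ, List.range_zero, List.nil_append, List.filter_cons, List.filter_nil]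
  by_cases hk : k = p.getD 0 0
  · subst hk
    have hkey : (pvKey p 0 == p.getD 0 0) = true := by simp [pvKey]
    simp only [hkey]
    rfl
  · have hkey : (pvKey p 0 == k) = false := by
      simp only [pvKey, beq_eq_false_iff_ne, ne_eq]
      intro hc
      apply hk
      omega
    simp only [hkey, if_neg hk, Bool.false_eq_true, if_false, List.map_nil]
    rfl

theorem pvCur_step (p : List Int) (m : Nat) (st : PySem.Dict Int Int × Int)
    (h2 : st.2 = pvD p m) (h1 : ∀ k : Int, st.1.get? k = pvKeyMax p m k) :
    pvCur p st ((m + 1 : Nat) : Int) = pvD p (m + 1) := by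
  unfold pvCur
  simp only [PySem.List.pyGetD_natCast]
  rw [show p.getD (m + 1) 0 - ((m + 1 : Nat) : Int) = pvKey p (m + 1) from rfl]
  rw [h1 (pvKey p (m + 1)), h2, pvD_succ]
  have hInner : pvInner p (pvDvals p m)
      = ((((List.range (m + 1)).filter (fun j => pvKey p j == pvKey p (m + 1))).map (pvD p)).map
          (· + p.getD (m + 1) 0)).foldl max (p.getD (m + 1) 0) := by
    simp only [pvInner, pvDvals_length, List.map_map]
    congr 1
    apply List.map_congr_left
    intro j hj
    have hjm : j < m + 1 := List.mem_range.mp (List.mem_of_mem_filter hj)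
    simp only [Function.comp]
    rw [pvDvals_getD p (by omega : j ≤ m)]
  rw [hInner, show (pvDvals p m).getD m 0 = pvD p m from rfl]
  rcases hLc : ((List.range (m + 1)).filter (fun j => pvKey p j == pvKey p (m + 1))).map (pvD p)
      with _ | ⟨x, t⟩
  · rw [show pvKeyMax p m (pvKey p (m + 1)) = none by unfold pvKeyMax; rw [hLc]]
    simp
  · rw [show pvKeyMax p m (pvKey p (m + 1)) = some (t.foldl max x) by
      unfold pvKeyMax; rw [hLc]]
    simp only [List.map_cons, List.foldl_cons]
    rw [pv_foldl_max_max, pv_foldl_max_map_add]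
    refine le_antisymm ?_ ?_ <;> simp only [max_le_iff, le_max_iff] <;> omega

theorem pvBodyB_step (p : List Int) (m : Nat) (st : PySem.Dict Int Int × Int)
    (h2 : st.2 = pvD p m) (h1 : ∀ k : Int, st.1.get? k = pvKeyMax p m k) :
    (pvBodyB p st ((m + 1 : Nat) : Int)).2 = pvD p (m + 1)
    ∧ ∀ k : Int, (pvBodyB p st ((m + 1 : Nat) : Int)).1.get? k = pvKeyMax p (m + 1) k := by
  have hcur := pvCur_step p m st h2 h1
  constructor
  · exact hcur
  · intro k
    show (PySem.Dict.insert st.1 _ _).get? k = _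
    simp only [PySem.List.pyGetD_natCast] at *
    rw [show p.getD (m + 1) 0 - ((m + 1 : Nat) : Int) = pvKey p (m + 1) from rfl] at *
    rw [hcur]
    rw [PySem.Dict.get?_insert]
    by_cases hk : k = pvKey p (m + 1)
    · subst hk
      rw [if_pos rfl]
      unfold pvKeyMax
      rw [List.range_succ (n := m + 1), List.filter_append, List.map_append]
      have hfil : (List.filter (fun j => pvKey p j == pvKey p (m + 1)) [m + 1]) = [m + 1] := by
        simp
      rw [hfil]
      rw [PySem.Dict.getD_eq_get?_getD, h1]
      rcases hLc : ((List.range (m + 1)).filter (fun j => pvKey p j == pvKey p (m + 1))).map (pvD p)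
          with _ | ⟨x, t⟩
      · unfold pvKeyMax
        rw [hLc]
        simp
      · unfold pvKeyMax
        rw [hLc]
        simp only [List.map_cons, List.map_nil, List.cons_append, Option.getD_some,
          List.foldl_append, List.foldl_cons, List.foldl_nil]
    · rw [if_neg hk, h1 k]
      unfold pvKeyMax
      rw [List.range_succ (n := m + 1), List.filter_append, List.map_append]
      have hfil : (List.filter (fun j => pvKey p j == k) [m + 1]) = [] := by
        simp only [List.filter_cons, List.filter_nil]
        rw [if_neg (by simp only [beq_iff_eq]; intro hc; exact hk hc.symm)]
      rw [hfil, List.map_nil, List.append_nil]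

theorem pvB_loop (p : List Int) : ∀ m : Nat, m < p.length →
    (((PySem.List.pyRange 1 ((m : Int) + 1) 1).foldl (pvBodyB p)
        (PySem.Dict.insert PySem.Dict.empty (PySem.List.pyGetD p 0 0) 0, 0)).2 = pvD p m)
    ∧ ∀ k : Int, ((PySem.List.pyRange 1 ((m : Int) + 1) 1).foldl (pvBodyB p)
        (PySem.Dict.insert PySem.Dict.empty (PySem.List.pyGetD p 0 0) 0, 0)).1.get? k
          = pvKeyMax p m k := by
  intro m
  induction m with
  | zero =>
    intro h
    rw [show ((0 : Nat) : Int) + 1 = 1 by ring, PySem.List.pyRange_one_eq_nil (le_refl _),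
        List.foldl_nil]
    refine ⟨rfl, fun k => ?_⟩
    rw [PySem.List.pyGetD_zero]
    exact pvKeyMax_zero p k
  | succ m ih =>
    intro h
    obtain ⟨ih2, ih1⟩ := ih (by omega)
    rw [show ((m + 1 : Nat) : Int) + 1 = ((m : Int) + 1) + 1 by push_cast; ring,
        PySem.List.pyRange_one_succ_right (by omega), List.foldl_append, List.foldl_cons,
        List.foldl_nil]
    rw [show ((m : Int) + 1) = ((m + 1 : Nat) : Int) by push_cast; ring]
    exact pvBodyB_step p m _ ih2 ih1

theorem pvB_final (p : List Int) (hp : p ≠ []) :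
    getMaximumScore_alt p = pvD p (p.length - 1) := by
  have hlen : 0 < p.length := List.length_pos_iff.mpr hp
  rw [pvB_eq p hp]
  rw [show (p.length : Int) = ((p.length - 1 : Nat) : Int) + 1 by omega]
  exact (pvB_loop p (p.length - 1) (by omega)).1

-- ===== VERDICT (by name: the statement is the Claim_ definition above) =====
theorem getMaximumScore_spec : Claim_equal_getMaximumScore := by
  intro p _ hpre
  unfold Spec_getMaximumScore
  rw [pvA_final p hpre, pvB_final p hpre]
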